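-- pv_equiv track=rewrite | github.com/teymuri/milton | computil/common.py | dur_to_onset
-- ===== SOURCE A (Python) =====
-- def dur_to_onset(durs, offset=0):
--     """Returns a list of (accumulated onset, corresponding duration).
--     Offset is the desired starting onset."""
--     durs = list(durs) # convert to pop
--     onsets = []
--     while durs:
--         d = durs.pop(0)
--         onsets.append((d, offset))
--         offset += d
--     return onsets
-- ===== SOURCE B (Python) =====
-- import itertools
--
-- def dur_to_onset(durs, offset=0):
--     """Returns a list of (duration, accumulated onset) pairs.
--     Offset is the desired starting onset."""
--     durs = list(durs)
--     onsets = list(itertools.accumulate([offset, *durs]))[:len(durs)]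
--     return list(zip(durs, onsets))
-- ===== Notes on version B (the rewrite author's own statement) =====
-- stated objective: faster
-- what changed: Replaces the destructive pop(0)-and-accumulate while loop with a two-pass table build: a prefix-sum onset table via itertools.accumulate, then a zip pairing each duration with its pre-onset.
import Mathlib
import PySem

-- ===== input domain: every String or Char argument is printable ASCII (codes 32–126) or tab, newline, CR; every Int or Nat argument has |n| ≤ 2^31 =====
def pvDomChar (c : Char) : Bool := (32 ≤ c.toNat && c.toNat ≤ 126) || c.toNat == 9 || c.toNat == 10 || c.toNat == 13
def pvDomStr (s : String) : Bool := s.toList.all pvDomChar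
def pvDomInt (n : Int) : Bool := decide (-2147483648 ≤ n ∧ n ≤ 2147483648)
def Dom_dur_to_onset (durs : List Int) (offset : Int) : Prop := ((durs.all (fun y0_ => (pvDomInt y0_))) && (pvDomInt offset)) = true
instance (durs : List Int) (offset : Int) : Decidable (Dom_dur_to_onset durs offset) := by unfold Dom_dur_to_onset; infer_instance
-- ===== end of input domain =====

-- ===== PORT A =====
-- A: while loop popping the head, appending (d, offset), accumulating offset.
def dur_to_onset (durs : List Int) (offset : Int) : List (Int × Int) :=
  match durs with
  | [] => []
  | d :: rest => (d, offset) :: dur_to_onset rest (offset + d)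

-- ===== PORT B =====
-- B: build the onset prefix-sum table (itertools.accumulate ≙ List.scanl), truncate, zip.
def dur_to_onset_alt (durs : List Int) (offset : Int) : List (Int × Int) :=
  let onsets := (List.scanl (· + ·) offset durs).take durs.length
  durs.zip onsets

-- ===== PRECONDITION & SPEC =====
def Spec_dur_to_onset (durs : List Int) (offset : Int) (out : List (Int × Int)) : Prop := out = dur_to_onset_alt durs offset
instance (durs : List Int) (offset : Int) (out : List (Int × Int)) : Decidable (Spec_dur_to_onset durs offset out) := by unfold Spec_dur_to_onset; infer_instance

-- ===== CLAIM (what is proved, stated in full; the proofs are below) =====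
def Claim_equal_dur_to_onset : Prop := ∀ (durs : List Int) (offset : Int), Dom_dur_to_onset durs offset → Spec_dur_to_onset durs offset (dur_to_onset durs offset)

-- ===== LEMMAS AND PROOFS =====

theorem eq_aux : ∀ (durs : List Int) (offset : Int), dur_to_onset durs offset = dur_to_onset_alt durs offset := by
  intro durs
  induction durs with
  | nil => intro offset; rfl
  | cons d rest ih =>
      intro offset
      simp only [dur_to_onset, dur_to_onset_alt, List.scanl, List.length_cons,
        List.take_succ_cons, List.zip_cons_cons]
      simpa [dur_to_onset_alt] using ih (offset + d)

-- ===== VERDICT (by name: the statement is the Claim_ definition above) =====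
theorem dur_to_onset_spec : Claim_equal_dur_to_onset := by
  intro durs offset _
  unfold Spec_dur_to_onset
  exact eq_aux durs offset
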